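-- pv_equiv track=rewrite | github.com/sargupta/sahayakai | sahayakai-agents/cloud_functions/auto_abort/main.py | _demote
-- ===== SOURCE A (Python) =====
-- _DEMOTE_TABLE: dict[tuple[str, int], tuple[str, int]] = {
--     ("full", 100): ("canary", 100),
--     ("canary", 100): ("canary", 50),
--     ("canary", 50): ("canary", 25),
--     ("canary", 25): ("canary", 5),
--     ("canary", 5): ("shadow", 25),
--     ("shadow", 25): ("shadow", 5),
--     ("shadow", 5): ("shadow", 1),
--     ("shadow", 1): ("off", 0),
--     ("shadow", 0): ("off", 0),
--     ("off", 0): ("off", 0),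
-- }
--
-- _VALID_MODES = {"off", "shadow", "canary", "full"}
--
-- def _demote(mode: str, percent: int) -> tuple[str, int]:
--     """Return the (next_mode, next_percent) one step down the ladder.
--
--     Round-2 audit P0 LADDER-1 fix (30-agent review, group C1):
--     the previous fall-through "collapse to lowest rung in same mode"
--     PROMOTED `canary @ 0` (operator paused) to `shadow @ 25` because
--     no canary rung is ≤ 0. The auto-abort function MUST never promote
--     a rollout, ever — its entire job is to dampen.
--
--     New fall-through rules:
--     - direct ladder hit → demote per table
--     - off-ladder percent: collapse to the next LOWER rung in same mode
--     - if current percent is BELOW the lowest rung of the current mode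
--       (operator paused), the safest move is `off / 0` — never bump
--       back up to a higher-traffic mode
--
--     Examples:
--     - `canary, 0` → `off, 0` (was: `shadow, 25`)
--     - `canary, -5` (clamped to 0) → `off, 0` (was: `shadow, 25`)
--     - `canary, 75` → `canary, 25` (closest lower rung)
--     - `shadow, 0` → `off, 0` (mapped explicitly in table)
--     - `shadow, -10` (clamped to 0) → `off, 0`
--     - `garbage, 50` → `off, 0` (unknown mode → off; defensive)
--     """
--     mode = mode if mode in _VALID_MODES else "off"
--     percent = max(0, min(100, int(percent)))
--
--     # Direct ladder hit.
--     if (mode, percent) in _DEMOTE_TABLE: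
--         return _DEMOTE_TABLE[(mode, percent)]
--
--     # Fall-through: collapse to the closest lower step within the same mode.
--     rungs_for_mode = sorted(
--         (p for (m, p) in _DEMOTE_TABLE if m == mode and p <= percent),
--         reverse=True,
--     )
--     if rungs_for_mode:
--         return _DEMOTE_TABLE[(mode, rungs_for_mode[0])]
--
--     # No lower rung in same mode (e.g. canary @ 0, shadow @ 0). Demote
--     # to off — NEVER promote to a higher-traffic mode.
--     return ("off", 0)
-- ===== SOURCE B (Python) =====
-- _LADDER = [
--     ("full", 100),
--     ("canary", 100),
--     ("canary", 50),
--     ("canary", 25),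
--     ("canary", 5),
--     ("shadow", 25),
--     ("shadow", 5),
--     ("shadow", 1),
--     ("off", 0),
-- ]
--
-- _VALID_MODES = {"off", "shadow", "canary", "full"}
--
--
-- def _demote(mode: str, percent: int) -> tuple[str, int]:
--     mode = mode if mode in _VALID_MODES else "off"
--     percent = max(0, min(100, int(percent)))
--     # First rung (scanning from highest traffic down) of this mode with
--     # percent <= current traffic = the rung we currently stand on; the
--     # next ladder entry is one step down, clamped at the terminal off/0.
--     for i, (m, p) in enumerate(_LADDER):
--         if m == mode and p <= percent:
--             return _LADDER[min(i + 1, len(_LADDER) - 1)]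
--     return ("off", 0)
-- ===== Notes on version B (the rewrite author's own statement) =====
-- stated objective: simpler
-- what changed: Replaces the explicit (mode,percent)->(mode,percent) demotion dict plus table-hit check and sorted fall-through scan by a single ordered ladder list scanned once from the top: the first rung of the current mode with percent <= the clamped value is the current position and the next ladder entry (clamped at the terminal off/0) is the answer.
import Mathlib
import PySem

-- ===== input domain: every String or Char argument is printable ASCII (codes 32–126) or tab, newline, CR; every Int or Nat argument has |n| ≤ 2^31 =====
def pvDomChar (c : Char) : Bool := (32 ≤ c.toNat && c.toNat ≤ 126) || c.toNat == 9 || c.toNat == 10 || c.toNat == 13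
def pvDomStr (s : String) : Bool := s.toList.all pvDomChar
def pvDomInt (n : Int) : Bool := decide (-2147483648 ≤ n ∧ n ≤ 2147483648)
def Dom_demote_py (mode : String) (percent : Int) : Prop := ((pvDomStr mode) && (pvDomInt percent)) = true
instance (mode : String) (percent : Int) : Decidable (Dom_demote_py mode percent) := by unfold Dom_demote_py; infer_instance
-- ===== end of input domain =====

-- B replaces A's state→state dict plus sorted fall-through scan by one ordered
-- ladder list stepped down positionally (objective: simpler; no speed claim).

-- ===== PORT A =====
def pvTable : PySem.Dict (String × Int) (String × Int) :=
  PySem.Dict.ofList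
    [ (("full", 100), ("canary", 100))
    , (("canary", 100), ("canary", 50))
    , (("canary", 50), ("canary", 25))
    , (("canary", 25), ("canary", 5))
    , (("canary", 5), ("shadow", 25))
    , (("shadow", 25), ("shadow", 5))
    , (("shadow", 5), ("shadow", 1))
    , (("shadow", 1), ("off", 0))
    , (("shadow", 0), ("off", 0))
    , (("off", 0), ("off", 0)) ]

def pvValidModes : List String := ["off", "shadow", "canary", "full"]

-- A's body after mode validation and percent clamp: table hit, else sorted fall-through.
def pvDemoteCoreA (m : String) (p : Int) : String × Int :=
  if pvTable.contains (m, p) then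
    (pvTable.get? (m, p)).getD ("off", 0)  -- contains guarantees the key is present
  else
    let rungs := PySem.List.sorted
      (((pvTable.keys).filter (fun q => q.1 == m && q.2 ≤ p)).map (·.2)) (fun x => x) true
    match rungs with
    | r :: _ => (pvTable.get? (m, r)).getD ("off", 0)
    | [] => ("off", 0)

def demote_py (mode : String) (percent : Int) : String × Int :=
  pvDemoteCoreA (if pvValidModes.contains mode then mode else "off") (max 0 (min 100 percent))

-- ===== PORT B =====
def pvValidModesB : List String := ["off", "shadow", "canary", "full"]

def pvLadder : List (String × Int) :=
  [ ("full", 100), ("canary", 100), ("canary", 50), ("canary", 25), ("canary", 5)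
  , ("shadow", 25), ("shadow", 5), ("shadow", 1), ("off", 0) ]

-- B's for-loop with early return over enumerate(_LADDER).
def pvDemoteCoreB (m : String) (p : Int) : List (Int × (String × Int)) → String × Int
  | [] => ("off", 0)
  | (i, (mm, pp)) :: rest =>
      if mm == m && pp ≤ p then
        PySem.List.pyGetD pvLadder (min (i + 1) ((pvLadder.length : Int) - 1)) ("off", 0)
      else pvDemoteCoreB m p rest

def demote_py_alt (mode : String) (percent : Int) : String × Int :=
  pvDemoteCoreB (if pvValidModesB.contains mode then mode else "off") (max 0 (min 100 percent))
    (PySem.List.enumerate pvLadder)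

-- ===== PRECONDITION & SPEC =====
def Spec_demote_py (mode : String) (percent : Int) (out : String × Int) : Prop := out = demote_py_alt mode percent
instance (mode : String) (percent : Int) (out : String × Int) : Decidable (Spec_demote_py mode percent out) := by unfold Spec_demote_py; infer_instance

-- ===== CLAIM (what is proved, stated in full; the proofs are below) =====
def Claim_equal_demote_py : Prop := ∀ (mode : String) (percent : Int), Dom_demote_py mode percent → Spec_demote_py mode percent (demote_py mode percent)

-- ===== LEMMAS AND PROOFS =====

theorem pvCore_eq (m : String)
    (hm : m = "off" ∨ m = "shadow" ∨ m = "canary" ∨ m = "full")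
    (p : Int) (h1 : 0 ≤ p) (h2 : p ≤ 100) :
    pvDemoteCoreA m p = pvDemoteCoreB m p (PySem.List.enumerate pvLadder) := by
  rcases hm with rfl | rfl | rfl | rfl <;> interval_cases p <;> decide

theorem pvNorm_cases (mode : String) :
    (if pvValidModes.contains mode then mode else "off") = "off" ∨
    (if pvValidModes.contains mode then mode else "off") = "shadow" ∨
    (if pvValidModes.contains mode then mode else "off") = "canary" ∨
    (if pvValidModes.contains mode then mode else "off") = "full" := by
  by_cases h : pvValidModes.contains mode
  · simp only [if_pos h]
    simp [pvValidModes, List.contains_eq_mem] at h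
    tauto
  · left; rw [if_neg h]

-- ===== VERDICT (by name: the statement is the Claim_ definition above) =====
theorem demote_py_spec : Claim_equal_demote_py := by
  unfold Claim_equal_demote_py Spec_demote_py
  intro mode percent _
  unfold demote_py demote_py_alt
  rw [show pvValidModesB = pvValidModes from rfl]
  exact pvCore_eq _ (pvNorm_cases mode) _ (le_max_left _ _) (by omega)
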